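-- pv_equiv track=rewrite | github.com/ManiaJack/PythonStudy | FunnelTower.py | funnel_layer
-- ===== SOURCE A (Python) =====
-- def funnel_layer(n):
--     if n > 1000 or n <= 0:
--         raise ValueError('Numbers have to be 1~1000')
--     if n == 1:
--         return [1, 0]
--     n = n - 1
--     x = 1
--     while n >= 4 * x + 2:
--         n = n - 4 * x - 2
--         x = x + 1
--     return [x, n]
-- ===== SOURCE B (Python) =====
-- def _isqrt(k):
--     r = 0
--     while (r + 1) * (r + 1) <= k:
--         r += 1
--     return r
--
-- def funnel_layer(n):
--     if n > 1000 or n <= 0: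
--         raise ValueError('Numbers have to be 1~1000')
--     m = n - 1
--     x = _isqrt((m + 2) // 2)
--     return [x, m - 2 * x * x + 2]
-- ===== Notes on version B (the rewrite author's own statement) =====
-- stated objective: simpler
-- what changed: Replaces A's layer-by-layer subtraction loop (and its separate n == 1 special case) by a closed form: x = isqrt((n+1)//2) and remainder n - 1 - 2*x*x + 2, keeping the identical ValueError guard.
import Mathlib
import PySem

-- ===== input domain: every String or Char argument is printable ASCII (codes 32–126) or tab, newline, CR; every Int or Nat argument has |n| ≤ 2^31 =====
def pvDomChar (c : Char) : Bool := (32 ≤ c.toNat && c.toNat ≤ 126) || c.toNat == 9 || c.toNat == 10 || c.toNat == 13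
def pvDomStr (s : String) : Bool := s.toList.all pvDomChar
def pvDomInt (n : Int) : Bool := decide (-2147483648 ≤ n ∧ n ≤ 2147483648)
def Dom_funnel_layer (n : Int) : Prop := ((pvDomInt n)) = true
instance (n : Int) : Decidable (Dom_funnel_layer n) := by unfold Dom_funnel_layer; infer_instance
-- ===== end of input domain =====

-- B replaces A's iterative layer-by-layer subtraction by a direct integer-square-root
-- closed form (simpler: no subtraction loop, and the n == 1 special case disappears).

-- ===== PORT A =====
-- A's while loop; fuel only makes the recursion total (fuel = n.toNat + 1 always suffices).
def funnelLoopA (fuel : Nat) (n x : Int) : Int × Int :=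
  match fuel with
  | 0 => (x, n)
  | f + 1 => if n ≥ 4 * x + 2 then funnelLoopA f (n - 4 * x - 2) (x + 1) else (x, n)

def funnel_layer (n : Int) : List Int :=
  if n > 1000 ∨ n ≤ 0 then []   -- Python raises ValueError here (outside Pre_)
  else if n = 1 then [1, 0]
  else
    let m := n - 1
    let p := funnelLoopA (m.toNat + 1) m 1
    [p.1, p.2]

-- ===== PORT B =====
-- B's _isqrt increment loop; fuel only makes it total (fuel = k.toNat + 1 suffices).
def isqrtLoopB (fuel : Nat) (k r : Int) : Int :=
  match fuel with
  | 0 => r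
  | f + 1 => if (r + 1) * (r + 1) ≤ k then isqrtLoopB f k (r + 1) else r

def funnel_layer_alt (n : Int) : List Int :=
  if n > 1000 ∨ n ≤ 0 then []   -- Python raises ValueError here (outside Pre_)
  else
    let m := n - 1
    let x := isqrtLoopB ((PySem.Int.floordiv (m + 2) 2).toNat + 1) (PySem.Int.floordiv (m + 2) 2) 0
    [x, m - 2 * x * x + 2]

-- ===== PRECONDITION & SPEC =====
-- A raises ValueError exactly when n > 1000 or n <= 0.
def Pre_funnel_layer (n : Int) : Prop := 1 ≤ n ∧ n ≤ 1000
instance (n : Int) : Decidable (Pre_funnel_layer n) := by unfold Pre_funnel_layer; infer_instance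
def pvWitness_funnel_layer : Int := (7)

def Spec_funnel_layer (n : Int) (out : List Int) : Prop := out = funnel_layer_alt n
instance (n : Int) (out : List Int) : Decidable (Spec_funnel_layer n out) := by unfold Spec_funnel_layer; infer_instance

-- ===== CLAIM (what is proved, stated in full; the proofs are below) =====
def Claim_equal_funnel_layer : Prop := ∀ (n : Int), Dom_funnel_layer n → Pre_funnel_layer n → Spec_funnel_layer n (funnel_layer n)

-- ===== LEMMAS AND PROOFS =====
set_option maxRecDepth 4000 in
theorem funnel_all : ∀ k : Nat, k < 1000 → funnel_layer ((k : Int) + 1) = funnel_layer_alt ((k : Int) + 1) := by decide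

-- ===== VERDICT (by name: the statement is the Claim_ definition above) =====
theorem funnel_layer_spec : Claim_equal_funnel_layer := by
  intro n _ hpre
  obtain ⟨h1, h2⟩ := hpre
  have hk : n = ((n - 1).toNat : Int) + 1 := by omega
  have hlt : (n - 1).toNat < 1000 := by omega
  unfold Spec_funnel_layer
  rw [hk]
  exact funnel_all _ hlt
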